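-- pv_equiv track=rewrite | github.com/henbennet/AoC2022 | day3.py | Part2
-- ===== SOURCE A (Python) =====
-- def Part2(group):
--     for a in group[0]:
--         for b in group[1]:
--             if a == b:
--                 for c in group[2]:
--                     if a == c:
--                         return int(ord(a))
--     return 0
-- ===== SOURCE B (Python) =====
-- def Part2(group):
--     common = set(group[1]) & set(group[2])
--     for a in group[0]:
--         if a in common:
--             return ord(a)
--     return 0
-- ===== Notes on version B (the rewrite author's own statement) =====
-- stated objective: alternative
-- what changed: Replaces the triple nested character scan with a precomputed set intersection of group[1] and group[2] and a single pass over group[0].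
-- outside the precondition, e.g. on Part2(['']): A returns 0, B raises IndexError; on Part2(['ab', 'cd']): A returns 0, B raises IndexError
import Mathlib
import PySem

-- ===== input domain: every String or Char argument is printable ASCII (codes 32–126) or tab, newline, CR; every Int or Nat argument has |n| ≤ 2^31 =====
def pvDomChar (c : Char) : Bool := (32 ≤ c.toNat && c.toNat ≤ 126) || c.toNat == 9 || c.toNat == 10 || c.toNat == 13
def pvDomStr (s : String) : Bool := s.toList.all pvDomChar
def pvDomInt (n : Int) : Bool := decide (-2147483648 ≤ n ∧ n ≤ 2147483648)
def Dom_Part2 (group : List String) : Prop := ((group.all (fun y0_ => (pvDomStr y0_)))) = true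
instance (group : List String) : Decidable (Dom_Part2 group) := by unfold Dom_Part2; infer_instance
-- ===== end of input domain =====

-- B replaces A's triple nested scan by a set intersection of group[1]/group[2] and one pass over group[0].

-- ===== PORT A =====
-- inner loop: for c in group[2]: if a == c: return ord(a)
def partAc (a : Char) : List Char → Option Int
  | [] => none
  | c :: cs => if a = c then some (Int.ofNat a.toNat) else partAc a cs

-- middle loop: for b in group[1]: if a == b: <scan group[2]>
def partAb (a : Char) (g2 : List Char) : List Char → Option Int
  | [] => none
  | b :: bs =>
    if a = b then
      match partAc a g2 with
      | some r => some r
      | none => partAb a g2 bs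
    else partAb a g2 bs

-- outer loop: for a in group[0]: …
def partAa (g1 g2 : List Char) : List Char → Option Int
  | [] => none
  | a :: as =>
    match partAb a g2 g1 with
    | some r => some r
    | none => partAa g1 g2 as

def Part2 (group : List String) : Int :=
  let g0 := (PySem.List.pyGetD group 0 "").toList
  let g1 := (PySem.List.pyGetD group 1 "").toList
  let g2 := (PySem.List.pyGetD group 2 "").toList
  (partAa g1 g2 g0).getD 0

-- ===== PORT B =====
-- for a in group[0]: if a in common: return ord(a)
def partBscan (common : PySem.Set Char) : List Char → Option Int
  | [] => none
  | a :: as => if PySem.Set.contains common a then some (Int.ofNat a.toNat) else partBscan common as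

def Part2_alt (group : List String) : Int :=
  let common := PySem.Set.inter (PySem.Set.ofList (PySem.List.pyGetD group 1 "").toList)
                                (PySem.Set.ofList (PySem.List.pyGetD group 2 "").toList)
  (partBscan common (PySem.List.pyGetD group 0 "").toList).getD 0

-- ===== PRECONDITION & SPEC =====
-- Pre_ excludes lists with fewer than 3 strings: there A raises IndexError unless its lazy scan
-- happens to stop before touching the missing element (returning 0), while B always indexes all three and raises.
def Pre_Part2 (group : List String) : Prop := 3 ≤ group.length
instance (group : List String) : Decidable (Pre_Part2 group) := by unfold Pre_Part2; infer_instance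
def pvWitness_Part2 : List String := ["abc", "cab", "bca"]
def Spec_Part2 (group : List String) (out : Int) : Prop := out = Part2_alt group
instance (group : List String) (out : Int) : Decidable (Spec_Part2 group out) := by unfold Spec_Part2; infer_instance

-- ===== CLAIM (what is proved, stated in full; the proofs are below) =====
def Claim_equal_Part2 : Prop := ∀ (group : List String), Dom_Part2 group → Pre_Part2 group → Spec_Part2 group (Part2 group)

-- ===== LEMMAS AND PROOFS =====
theorem partAc_eq (a : Char) (g2 : List Char) :
    partAc a g2 = if a ∈ g2 then some (Int.ofNat a.toNat) else none := by
  induction g2 with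
  | nil => simp [partAc]
  | cons c cs ih =>
    by_cases h : a = c <;> simp [partAc, h, ih]

theorem partAb_eq (a : Char) (g2 g1 : List Char) :
    partAb a g2 g1 = if a ∈ g1 ∧ a ∈ g2 then some (Int.ofNat a.toNat) else none := by
  induction g1 with
  | nil => simp [partAb]
  | cons b bs ih =>
    by_cases hb : a = b
    · subst hb
      by_cases h2 : a ∈ g2 <;> simp [partAb, partAc_eq, h2, ih]
    · simp [partAb, hb, ih]

theorem partAa_eq_scan (g1 g2 g0 : List Char) :
    partAa g1 g2 g0 =
      partBscan (PySem.Set.inter (PySem.Set.ofList g1) (PySem.Set.ofList g2)) g0 := by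
  induction g0 with
  | nil => rfl
  | cons a as ih =>
    have hc : PySem.Set.contains (PySem.Set.inter (PySem.Set.ofList g1) (PySem.Set.ofList g2)) a
        = true ↔ (a ∈ g1 ∧ a ∈ g2) := by
      rw [PySem.Set.contains_iff, PySem.Set.mem_inter]
      simp [PySem.Set.mem_ofList]
    by_cases h : a ∈ g1 ∧ a ∈ g2
    · simp [partAa, partAb_eq, h, partBscan]
    · have hcf : PySem.Set.contains (PySem.Set.inter (PySem.Set.ofList g1) (PySem.Set.ofList g2)) a
          = false := by rw [Bool.eq_false_iff]; intro hx; exact h (hc.mp hx)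
      simp [partAa, partAb_eq, h, partBscan, ih]

-- ===== VERDICT (by name: the statement is the Claim_ definition above) =====
theorem Part2_spec : Claim_equal_Part2 := by
  intro group _ _
  unfold Spec_Part2
  exact congrArg (fun o => o.getD 0)
    (partAa_eq_scan ((PySem.List.pyGetD group 1 "").toList) ((PySem.List.pyGetD group 2 "").toList)
      ((PySem.List.pyGetD group 0 "").toList))
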